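-- pv_equiv track=rewrite | github.com/pedroblackjsousa/csgostatsportugal | csgostats2.py | getroundlist
-- ===== SOURCE A (Python) =====
-- def getroundlist(demo):
-- 	roundlist = []
-- 	auxlist =  []
-- 	for line in demo:
-- 		if "round_end" in line.split(" "):
-- 			auxlist.append(line.strip())
-- 			roundlist.append(cleanround(auxlist))
-- 			auxlist = []
-- 		else:
-- 			auxlist.append(line.strip())
-- 	return roundlist
--
-- def cleanround(round):
--
-- 	cleanedround = []
-- 	round_started_index = 0
-- 	for line in round:
-- 		if "round_start" in line:
-- 			round_started_index = round.index(line)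
-- 	return round[round_started_index:]
-- ===== SOURCE B (Python) =====
-- def getroundlist(demo):
--     roundlist = []
--     aux = []
--     last_start = None
--     for line in demo:
--         s = line.strip()
--         aux.append(s)
--         if "round_start" in s:
--             last_start = s
--         if "round_end" in line.split(" "):
--             begin = aux.index(last_start) if last_start is not None else 0
--             roundlist.append(aux[begin:])
--             aux = []
--             last_start = None
--     return roundlist
-- ===== Notes on version B (the rewrite author's own statement) =====
-- stated objective: alternative
-- what changed: One pass that remembers the last 'round_start' line while building the round and does a single list.index per round, instead of cleanround's rescan calling round.index for every round_start line.
import Mathlib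
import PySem

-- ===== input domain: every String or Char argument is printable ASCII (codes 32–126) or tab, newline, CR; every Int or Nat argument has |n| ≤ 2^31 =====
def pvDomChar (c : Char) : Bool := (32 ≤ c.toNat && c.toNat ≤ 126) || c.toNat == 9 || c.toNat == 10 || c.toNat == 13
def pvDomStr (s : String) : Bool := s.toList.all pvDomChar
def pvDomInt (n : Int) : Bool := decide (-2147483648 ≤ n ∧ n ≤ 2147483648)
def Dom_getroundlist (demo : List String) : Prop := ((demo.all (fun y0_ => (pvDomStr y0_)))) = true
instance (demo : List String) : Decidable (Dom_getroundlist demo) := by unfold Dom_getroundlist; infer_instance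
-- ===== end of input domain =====

-- B remembers the last 'round_start' line during the single pass and locates it with one
-- list.index call per round, replacing cleanround's per-line round.index rescans (alternative).

-- ===== PORT A =====
-- helper: the 'round_started_index' cleanround's loop ends with
-- (round.index(line) always succeeds since line ∈ round, so the getD 0 default is unreachable)
def roundStartIdx (round : List String) : Nat :=
  round.foldl
    (fun acc line =>
      if PySem.Str.isIn "round_start" line then (PySem.List.index? round line).getD 0 else acc)
    0

def cleanround (round : List String) : List String :=
  PySem.List.slice round (some ((roundStartIdx round : Nat) : Int)) none

def stepA (st : List (List String) × List String) (line : String) :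
    List (List String) × List String :=
  if ((PySem.Str.split? line " ").getD []).contains "round_end" then
    (st.1 ++ [cleanround (st.2 ++ [PySem.Str.strip line])], [])
  else
    (st.1, st.2 ++ [PySem.Str.strip line])

def getroundlist (demo : List String) : List (List String) :=
  (demo.foldl stepA ([], [])).1

-- ===== PORT B =====
-- state: (roundlist, aux, last_start); aux.index(last_start) always succeeds since
-- last_start was appended to aux, so the getD 0 default is unreachable
-- begin = aux.index(last_start) if last_start is not None else 0
def beginB (aux : List String) (last : Option String) : Nat :=
  match last with
  | some t => (PySem.List.index? aux t).getD 0
  | none => 0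

def stepB (st : List (List String) × List String × Option String) (line : String) :
    List (List String) × List String × Option String :=
  let s := PySem.Str.strip line
  let aux := st.2.1 ++ [s]
  let last := if PySem.Str.isIn "round_start" s then some s else st.2.2
  if ((PySem.Str.split? line " ").getD []).contains "round_end" then
    (st.1 ++ [PySem.List.slice aux (some ((beginB aux last : Nat) : Int)) none], [], none)
  else
    (st.1, aux, last)

def getroundlist_alt (demo : List String) : List (List String) :=
  (demo.foldl stepB ([], [], none)).1

-- ===== PRECONDITION & SPEC =====
def Spec_getroundlist (demo : List String) (out : List (List String)) : Prop := out = getroundlist_alt demo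
instance (demo : List String) (out : List (List String)) : Decidable (Spec_getroundlist demo out) := by unfold Spec_getroundlist; infer_instance

-- ===== CLAIM (what is proved, stated in full; the proofs are below) =====
def Claim_equal_getroundlist : Prop := ∀ (demo : List String), Dom_getroundlist demo → Spec_getroundlist demo (getroundlist demo)

-- ===== LEMMAS AND PROOFS =====

-- B's invariant: last_start is the last round_start line of aux, and it occurs in aux
def InvB (aux : List String) (last : Option String) : Prop :=
  (last = none → roundStartIdx aux = 0) ∧
  (∀ t, last = some t → t ∈ aux ∧ roundStartIdx aux = (PySem.List.index? aux t).getD 0)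

-- cleanround's index over aux ++ [s]
lemma roundStartIdx_append (aux : List String) (s : String) :
    roundStartIdx (aux ++ [s]) =
      if PySem.Str.isIn "round_start" s then (PySem.List.index? (aux ++ [s]) s).getD 0
      else roundStartIdx aux := by
  unfold roundStartIdx
  rw [List.foldl_append, List.foldl_cons, List.foldl_nil]
  have hcong :
      aux.foldl (fun acc line => if PySem.Str.isIn "round_start" line then
          (PySem.List.index? (aux ++ [s]) line).getD 0 else acc) 0 =
        aux.foldl (fun acc line => if PySem.Str.isIn "round_start" line then
          (PySem.List.index? aux line).getD 0 else acc) 0 := by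
    apply PySem.List.foldl_congr_mem
    intro acc x hx
    rw [PySem.List.index?_append_of_mem [s] hx]
  by_cases hin : PySem.Str.isIn "round_start" s = true
  · rw [if_pos hin, if_pos hin]
  · rw [if_neg hin, if_neg hin, hcong]

-- one non-resetting step of B preserves the invariant
lemma invB_step (aux : List String) (last : Option String) (s : String)
    (h : InvB aux last) :
    InvB (aux ++ [s]) (if PySem.Str.isIn "round_start" s then some s else last) := by
  by_cases hin : PySem.Str.isIn "round_start" s = true
  · rw [if_pos hin]
    refine ⟨fun hc => (nomatch hc), fun t ht => ?_⟩
    injection ht with ht; subst ht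
    exact ⟨by simp, by rw [roundStartIdx_append, if_pos hin]⟩
  · rw [if_neg hin]
    refine ⟨fun hc => ?_, fun t ht => ?_⟩
    · rw [roundStartIdx_append, if_neg hin]; exact h.1 hc
    · obtain ⟨hmem, hidx⟩ := h.2 t ht
      refine ⟨List.mem_append_left _ hmem, ?_⟩
      rw [roundStartIdx_append, if_neg hin, PySem.List.index?_append_of_mem [s] hmem]
      exact hidx

-- with the invariant, B's begin_ is A's roundStartIdx
lemma begin_eq (aux : List String) (last : Option String) (h : InvB aux last) :
    beginB aux last = roundStartIdx aux := by
  unfold beginB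
  cases last with
  | none => exact (h.1 rfl).symm
  | some t => exact ((h.2 t rfl).2).symm

-- the loop invariant, pushed through the fold
lemma loop_eq (demo : List String) :
    ∀ (rl : List (List String)) (aux : List String) (last : Option String),
      InvB aux last →
      (demo.foldl stepA (rl, aux)).1 = (demo.foldl stepB (rl, aux, last)).1 := by
  induction demo with
  | nil => intro rl aux last _; rfl
  | cons line rest ih =>
    intro rl aux last hinv
    rw [List.foldl_cons, List.foldl_cons]
    set s := PySem.Str.strip line with hsdef
    set last' := (if PySem.Str.isIn "round_start" s then some s else last) with hldef
    have hinv' : InvB (aux ++ [s]) last' := invB_step aux last s hinv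
    have hinv0 : InvB [] none := ⟨fun _ => rfl, fun t ht => by cases ht⟩
    by_cases hre : ((PySem.Str.split? line " ").getD []).contains "round_end" = true
    · have hA : stepA (rl, aux) line = (rl ++ [cleanround (aux ++ [s])], []) := by
        rw [stepA, if_pos hre]
      have hB : stepB (rl, aux, last) line =
          (rl ++ [cleanround (aux ++ [s])], [], none) := by
        rw [stepB]
        simp only [← hsdef, ← hldef]
        rw [if_pos hre, begin_eq (aux ++ [s]) last' hinv']
        rfl
      rw [hA, hB]
      exact ih _ _ _ hinv0
    · have hA : stepA (rl, aux) line = (rl, aux ++ [s]) := by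
        rw [stepA, if_neg hre]
      have hB : stepB (rl, aux, last) line = (rl, aux ++ [s], last') := by
        rw [stepB]
        simp only [← hsdef, ← hldef]
        rw [if_neg hre]
      rw [hA, hB]
      exact ih _ _ _ hinv'

-- ===== VERDICT (by name: the statement is the Claim_ definition above) =====
theorem getroundlist_spec : Claim_equal_getroundlist := by
  intro demo _
  unfold Spec_getroundlist getroundlist getroundlist_alt
  exact loop_eq demo [] [] none ⟨fun _ => rfl, fun t ht => by cases ht⟩
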